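-- pv_equiv track=rewrite | github.com/tegieng7/cambridge-dictionary | cambridge/generate.py | __get_be_removed_index
-- ===== SOURCE A (Python) =====
-- def __get_be_removed_index(lst_info):
--     '''Clean block in the case multiple dictionary definition for word.'''
--     lst_info = sorted(lst_info, key=lambda x: (x[0], x[1], x[2]))
--     lst_remove = []
--     previous = None
--     for item in lst_info:
--         if previous is None or item[0] != previous[0]:
--             previous = item
--             continue
--         elif item[0] == previous[0] and item[1] != previous[1] and item[1] != 'zzz':
--             previous = item
--             continue
--         else:
--             lst_remove.append(item[-1])
--
--     return lst_remove
-- ===== SOURCE B (Python) =====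
-- def __get_be_removed_index(lst_info):
--     '''Clean block in the case multiple dictionary definition for word.'''
--     s = sorted(lst_info, key=lambda x: (x[0], x[1], x[2]))
--     return [cur[-1] for prev, cur in zip(s, s[1:])
--             if cur[0] == prev[0] and (cur[1] == prev[1] or cur[1] == 'zzz')]
-- ===== Notes on version B (the rewrite author's own statement) =====
-- stated objective: simpler
-- what changed: Replaces A's stateful scan (an Option 'previous' that is only advanced on kept items, with a three-way branch) by a stateless adjacent-pair filter: zip the sorted list with its tail and remove an item exactly when it shares the word with its immediate predecessor and its sense equals the predecessor's sense or is 'zzz'; equivalence rests on the sortedness of the list, which makes the last-kept sense recoverable from the immediate predecessor.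
import Mathlib
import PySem

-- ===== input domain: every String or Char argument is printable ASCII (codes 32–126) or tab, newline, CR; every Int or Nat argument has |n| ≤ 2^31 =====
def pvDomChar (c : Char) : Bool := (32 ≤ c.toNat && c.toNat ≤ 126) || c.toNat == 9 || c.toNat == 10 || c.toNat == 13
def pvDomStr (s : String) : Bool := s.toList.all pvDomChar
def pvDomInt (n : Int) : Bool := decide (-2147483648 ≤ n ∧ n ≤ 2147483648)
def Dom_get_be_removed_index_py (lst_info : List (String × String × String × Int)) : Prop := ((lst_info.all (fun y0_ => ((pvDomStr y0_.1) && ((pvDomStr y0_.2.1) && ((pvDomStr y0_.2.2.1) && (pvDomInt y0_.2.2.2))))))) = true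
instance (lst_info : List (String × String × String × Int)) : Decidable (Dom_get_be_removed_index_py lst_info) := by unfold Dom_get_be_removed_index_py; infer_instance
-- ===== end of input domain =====

-- B replaces A's stateful last-kept scan by a stateless adjacent-pair filter over the sorted list (same cost, simpler).

-- sorted(lst, key=lambda x: (x[0], x[1], x[2])): three-component tuple key, expressed
-- exactly via sort stability as a stable sort by x[2] followed by a stable sort by (x[0], x[1]).
def pvSortTriple (lst : List (String × String × String × Int)) : List (String × String × String × Int) :=
  PySem.List.sorted2 (PySem.List.sorted lst (fun x => x.2.2.1)) (fun x => x.1) (fun x => x.2.1)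

-- ===== PORT A =====
-- loop body of A's for-loop (state: previous, lst_remove)
def pvStepA (st : Option (String × String × String × Int) × List Int)
    (item : String × String × String × Int) :
    Option (String × String × String × Int) × List Int :=
  match st.1 with
  | none => (some item, st.2)
  | some previous =>
    if item.1 ≠ previous.1 then (some item, st.2)
    else if item.1 = previous.1 ∧ item.2.1 ≠ previous.2.1 ∧ item.2.1 ≠ "zzz" then
      (some item, st.2)
    else (some previous, st.2 ++ [item.2.2.2])

def get_be_removed_index_py (lst_info : List (String × String × String × Int)) : List Int :=
  ((pvSortTriple lst_info).foldl pvStepA (none, [])).2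

-- ===== PORT B =====
-- [cur[-1] for prev, cur in zip(s, s[1:]) if cur[0] == prev[0] and (cur[1] == prev[1] or cur[1] == 'zzz')]
def get_be_removed_index_py_alt (lst_info : List (String × String × String × Int)) : List Int :=
  (((pvSortTriple lst_info).zip (PySem.List.slice (pvSortTriple lst_info) (some 1))).filter
      (fun pc => pc.2.1 == pc.1.1 && (pc.2.2.1 == pc.1.2.1 || pc.2.2.1 == "zzz"))).map
    (fun pc => pc.2.2.2.2)

-- ===== PRECONDITION & SPEC =====
def Spec_get_be_removed_index_py (lst_info : List (String × String × String × Int)) (out : List Int) : Prop := out = get_be_removed_index_py_alt lst_info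
instance (lst_info : List (String × String × String × Int)) (out : List Int) : Decidable (Spec_get_be_removed_index_py lst_info out) := by unfold Spec_get_be_removed_index_py; infer_instance

-- ===== CLAIM (what is proved, stated in full; the proofs are below) =====
def Claim_equal_get_be_removed_index_py : Prop := ∀ (lst_info : List (String × String × String × Int)), Dom_get_be_removed_index_py lst_info → Spec_get_be_removed_index_py lst_info (get_be_removed_index_py lst_info)

-- ===== LEMMAS AND PROOFS =====

-- lex-≤ on the first two key components: what sorted2 guarantees between list positions
def pvR (a b : String × String × String × Int) : Prop :=
  a.1 ≤ b.1 ∧ (a.1 = b.1 → a.2.1 ≤ b.2.1)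

theorem pvR_trans {a b c : String × String × String × Int}
    (hab : pvR a b) (hbc : pvR b c) : pvR a c := by
  obtain ⟨h1, h2⟩ := hab; obtain ⟨h3, h4⟩ := hbc
  refine ⟨le_trans h1 h3, fun hac => ?_⟩
  have hab : a.1 = b.1 := le_antisymm h1 (hac ▸ h3)
  exact le_trans (h2 hab) (h4 (hab ▸ hac))

-- the comparison sorted2 uses
def pvLt (a b : String × String × String × Int) : Bool :=
  decide (a.1 < b.1) || (!decide (b.1 < a.1) && decide (a.2.1 < b.2.1))

theorem pvLt_true_R {a b : String × String × String × Int} (h : pvLt a b = true) : pvR a b := by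
  simp only [pvLt, Bool.or_eq_true, Bool.and_eq_true, Bool.not_eq_true', decide_eq_true_eq,
    decide_eq_false_iff_not] at h
  rcases h with h | ⟨h1, h2⟩
  · exact ⟨le_of_lt h, fun he => absurd he (ne_of_lt h)⟩
  · exact ⟨not_lt.mp h1, fun _ => le_of_lt h2⟩

theorem pvLt_false_R {a b : String × String × String × Int} (h : pvLt a b = false) : pvR b a := by
  simp only [pvLt, Bool.or_eq_false_iff, Bool.and_eq_false_iff, Bool.not_eq_false',
    decide_eq_true_eq, decide_eq_false_iff_not] at h
  refine ⟨not_lt.mp h.1, fun he => ?_⟩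
  rcases h.2 with h2 | h2
  · rw [he] at h2; exact absurd h2 (lt_irrefl _)
  · exact not_lt.mp h2

theorem pairwise_insertBy (x : String × String × String × Int)
    (l : List (String × String × String × Int)) (h : l.Pairwise pvR) :
    (PySem.List.insertBy pvLt x l).Pairwise pvR := by
  induction l with
  | nil => simp [PySem.List.insertBy]
  | cons y ys ih =>
    rw [List.pairwise_cons] at h
    show (if pvLt x y = true then x :: y :: ys else y :: PySem.List.insertBy pvLt x ys).Pairwise pvR
    split_ifs with hlt
    · refine List.pairwise_cons.mpr ⟨?_, List.pairwise_cons.mpr h⟩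
      intro z hz
      rcases List.mem_cons.mp hz with rfl | hz'
      · exact pvLt_true_R hlt
      · exact pvR_trans (pvLt_true_R hlt) (h.1 _ hz')
    · refine List.pairwise_cons.mpr ⟨?_, ih h.2⟩
      intro z hz
      have : z = x ∨ z ∈ ys := by
        have := PySem.List.mem_insertBy (before := pvLt) (x := x) (ys := ys) (y := z)
        exact this.mp hz
      rcases this with rfl | hz'
      · exact pvLt_false_R (by simpa using hlt)
      · exact h.1 _ hz'

theorem sortTriple_pairwise (lst : List (String × String × String × Int)) :
    (pvSortTriple lst).Pairwise pvR := by
  show (PySem.List.sorted2 (PySem.List.sorted lst (fun x => x.2.2.1))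
      (fun x => x.1) (fun x => x.2.1)).Pairwise pvR
  generalize PySem.List.sorted lst (fun x => x.2.2.1) = ys
  show (ys.foldl (fun acc x => PySem.List.insertBy pvLt x acc) []).Pairwise pvR
  have : ∀ (acc : List (String × String × String × Int)), acc.Pairwise pvR →
      (ys.foldl (fun acc x => PySem.List.insertBy pvLt x acc) acc).Pairwise pvR := by
    induction ys with
    | nil => intro acc h; exact h
    | cons z zs ih => intro acc h; exact ih _ (pairwise_insertBy z acc h)
  exact this [] (List.Pairwise.nil)

-- recursive form of A's scan once a previous is set: only previous.1 (run key) and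
-- previous.2.1 (last kept sense) matter
def scanA (k lk : String) : List (String × String × String × Int) → List Int
  | [] => []
  | x :: xs =>
    if x.1 ≠ k then scanA x.1 x.2.1 xs
    else if x.1 = k ∧ x.2.1 ≠ lk ∧ x.2.1 ≠ "zzz" then scanA k x.2.1 xs
    else x.2.2.2 :: scanA k lk xs

theorem foldA_acc (l : List (String × String × String × Int))
    (p : String × String × String × Int) (acc : List Int) :
    (l.foldl pvStepA (some p, acc)).2 = acc ++ scanA p.1 p.2.1 l := by
  induction l generalizing p acc with
  | nil => simp [scanA]
  | cons x xs ih =>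
    rw [List.foldl_cons, scanA]
    by_cases h1 : x.1 = p.1
    · by_cases h2 : x.2.1 ≠ p.2.1 ∧ x.2.1 ≠ "zzz"
      · have hs : pvStepA (some p, acc) x = (some x, acc) := by
          simp [pvStepA, h1, h2.1, h2.2]
        rw [hs, ih, if_neg (by simp [h1]), if_pos ⟨h1, h2⟩, h1]
      · have hs : pvStepA (some p, acc) x = (some p, acc ++ [x.2.2.2]) := by
          simp only [pvStepA]
          rw [if_neg (by simp [h1]), if_neg (by tauto)]
        rw [hs, ih, if_neg (by simp [h1]), if_neg (by tauto)]
        simp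
    · have hs : pvStepA (some p, acc) x = (some x, acc) := by
        simp [pvStepA, h1]
      rw [hs, ih, if_pos h1]

-- recursive form of B's adjacent-pair filter: e is the actual preceding element
def pairB (e : String × String × String × Int) :
    List (String × String × String × Int) → List Int
  | [] => []
  | x :: xs =>
    if x.1 == e.1 && (x.2.1 == e.2.1 || x.2.1 == "zzz") then x.2.2.2 :: pairB x xs
    else pairB x xs

theorem zip_filter_eq_pairB (l : List (String × String × String × Int))
    (e : String × String × String × Int) :
    ((((e :: l).zip l).filter
        (fun pc => pc.2.1 == pc.1.1 && (pc.2.2.1 == pc.1.2.1 || pc.2.2.1 == "zzz"))).map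
      (fun pc => pc.2.2.2.2)) = pairB e l := by
  induction l generalizing e with
  | nil => simp [pairB]
  | cons x xs ih =>
    rw [List.zip_cons_cons, List.filter_cons, pairB]
    by_cases h : (x.1 == e.1 && (x.2.1 == e.2.1 || x.2.1 == "zzz")) = true
    · rw [if_pos (by simpa using h), if_pos h, List.map_cons, ih]
    · rw [if_neg (by simpa using h), if_neg h, ih]

-- invariant of the main induction: (k, lk) is A's state (group key, last kept sense),
-- e the element immediately before the remaining list
def pvInv (k lk : String) (e : String × String × String × Int) : Prop :=
  k = e.1 ∧ lk ≤ e.2.1 ∧ (e.2.1 = lk ∨ e.2.1 = "zzz")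

theorem scanA_eq_pairB (l : List (String × String × String × Int))
    (k lk : String) (e : String × String × String × Int)
    (hinv : pvInv k lk e) (hp : (e :: l).Pairwise pvR) :
    scanA k lk l = pairB e l := by
  induction l generalizing k lk e with
  | nil => rfl
  | cons x xs ih =>
    obtain ⟨hk, hle, hor⟩ := hinv
    rw [List.pairwise_cons] at hp
    have hex : pvR e x := hp.1 x (List.mem_cons_self)
    have hxs : (x :: xs).Pairwise pvR := hp.2
    rw [scanA, pairB]
    by_cases h1 : x.1 = k
    · have hbe : (x.1 == e.1) = true := by simp [h1, hk]
      rw [if_neg (by simp [h1])]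
      by_cases h2 : x.2.1 ≠ lk ∧ x.2.1 ≠ "zzz"
      · -- kept: B must not remove either
        have hne : (x.2.1 == e.2.1 || x.2.1 == "zzz") = false := by
          rcases hor with h | h
          · simp [h, h2.1, h2.2]
          · simp [h, h2.2]
        rw [if_pos ⟨h1, h2⟩, if_neg (by simp [hne])]
        exact ih k x.2.1 x ⟨h1.symm, le_refl _, Or.inl rfl⟩ hxs
      · -- removed: B removes too
        have hrem : x.2.1 = lk ∨ x.2.1 = "zzz" := by tauto
        have hbt : (x.2.1 == e.2.1 || x.2.1 == "zzz") = true := by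
          rcases hrem with h | h
          · rcases hor with h' | h'
            · simp [h, h']
            · -- e.2.1 = "zzz", x.2.1 = lk: then lk ≤ e.2.1 ≤ x.2.1 = lk forces equality
              have hex2 : e.2.1 ≤ x.2.1 := hex.2 (by rw [hk] at h1; exact h1.symm)
              have hx_le : x.2.1 ≤ e.2.1 := by rw [h]; exact hle
              have : x.2.1 = e.2.1 := le_antisymm hx_le hex2
              simp [this]
          · simp [h]
        rw [if_neg (by tauto), if_pos (by simp [hbe, hbt])]
        congr 1
        refine ih k lk x ⟨h1.symm, ?_, ?_⟩ hxs
        · rcases hrem with h | h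
          · rw [h]
          · exact le_trans hle (hex.2 (by rw [hk] at h1; exact h1.symm))
        · tauto
    · -- new group
      have hbe : (x.1 == e.1) = false := by simp [hk ▸ h1]
      rw [if_pos h1, if_neg (by simp [hbe])]
      exact ih x.1 x.2.1 x ⟨rfl, le_refl _, Or.inl rfl⟩ hxs

-- ===== VERDICT (by name: the statement is the Claim_ definition above) =====
theorem get_be_removed_index_py_spec : Claim_equal_get_be_removed_index_py := by
  intro lst_info _
  unfold Spec_get_be_removed_index_py get_be_removed_index_py get_be_removed_index_py_alt
  have hpw := sortTriple_pairwise lst_info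
  rw [PySem.List.slice_from _ (by norm_num)]
  cases h : pvSortTriple lst_info with
  | nil => simp
  | cons x xs =>
    rw [h] at hpw
    show (List.foldl pvStepA (pvStepA (none, []) x) xs).2 = _
    have hs : pvStepA (none, []) x = (some x, []) := rfl
    rw [hs, foldA_acc xs x [], List.nil_append,
      scanA_eq_pairB xs x.1 x.2.1 x ⟨rfl, le_refl _, Or.inl rfl⟩ hpw]
    simpa using (zip_filter_eq_pairB xs x).symm
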